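-- pv_equiv track=rewrite | github.com/Pacil142857/HexSIgon | HexUI.py | find_max_index_and_color
-- ===== SOURCE A (Python) =====
-- def find_max_index_and_color(lst):
--     # Define the RGB values for the indices
--     colors = ['#f46d43', '#fdae61', '#fee08b', '#e6f598', '#abdda4', '#66c2a5', '#3288bd']
--
--     # Check if all elements in the list are 0
--     if all(x == 0 for x in lst):
--         return 'light gray'
--
--     # Find the index of the greatest integer
--     max_index = lst.index(max(lst))
--
--     # Convert the hex color code to RGB
--     hex_color = colors[max_index]
--     red = int(hex_color[1:3], 16)
--     green = int(hex_color[3:5], 16)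
--     blue = int(hex_color[5:7], 16)
--
--     return (red, green, blue)
-- ===== SOURCE B (Python) =====
-- # B: decide via truthiness (any), then SORT the indices by value (descending, stable)
-- # and pick the head -- sort-then-pick instead of A's max()+index() scans, with a
-- # precomputed RGB table instead of per-call hex parsing (objective: alternative).
-- _TABLE = [(244, 109, 67), (253, 174, 97), (254, 224, 139), (230, 245, 152),
--           (171, 221, 164), (102, 194, 165), (50, 136, 189)]
--
-- def find_max_index_and_color(lst):
--     if not any(lst):
--         return 'light gray'
--     order = sorted(range(len(lst)), key=lst.__getitem__, reverse=True)
--     return _TABLE[order[0]]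
-- ===== Notes on version B (the rewrite author's own statement) =====
-- stated objective: alternative
-- what changed: Replaces all()+max()+list.index() and per-call hex parsing by a truthiness test (any) plus a stable descending sort of the indices by value, taking the head of the sort order and indexing a precomputed RGB table.
-- outside the precondition, e.g. on find_max_index_and_color([0, 0]): A returns 'light gray', B returns 'light gray'; on find_max_index_and_color([0, 0, 0, 0, 0, 0, 0, 9]): A raises IndexError, B raises IndexError
import Mathlib
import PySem

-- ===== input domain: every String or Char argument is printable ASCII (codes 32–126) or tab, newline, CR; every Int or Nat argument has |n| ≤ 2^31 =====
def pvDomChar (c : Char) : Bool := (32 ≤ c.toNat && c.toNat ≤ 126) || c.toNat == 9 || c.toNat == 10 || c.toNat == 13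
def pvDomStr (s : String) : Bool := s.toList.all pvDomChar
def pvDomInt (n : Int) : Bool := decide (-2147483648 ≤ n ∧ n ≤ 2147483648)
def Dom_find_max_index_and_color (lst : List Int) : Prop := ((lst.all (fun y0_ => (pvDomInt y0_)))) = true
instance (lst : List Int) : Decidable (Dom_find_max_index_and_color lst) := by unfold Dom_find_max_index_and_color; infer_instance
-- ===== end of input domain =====

-- One honest line: B replaces A's all()+max()+list.index() and hex parsing by a truthiness
-- test plus a stable descending sort of the indices, head of which is the first argmax, and
-- a precomputed RGB table (objective: alternative).

-- ===== PORT A =====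
-- A's colors list
def pvColors : List String :=
  ["#f46d43", "#fdae61", "#fee08b", "#e6f598", "#abdda4", "#66c2a5", "#3288bd"]

def find_max_index_and_color (lst : List Int) : Int × Int × Int :=
  if lst.all (fun x => decide (x = 0)) then
    (0, 0, 0)  -- Python returns the string 'light gray' here: outside Pre_ (not an int triple)
  else
    match PySem.List.max? lst (fun x => x) with
    | none => (0, 0, 0)                       -- unreachable: lst ≠ [] in this branch
    | some m =>
      match PySem.List.index? lst m with
      | none => (0, 0, 0)                     -- unreachable: m ∈ lst
      | some maxIndex =>
        match PySem.List.pyGet? pvColors (maxIndex : Int) with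
        | none => (0, 0, 0)                   -- IndexError: outside Pre_
        | some hexColor =>
          let red := (PySem.Int.ofStrBase? (PySem.Str.slice hexColor (some 1) (some 3)) 16).getD 0
          let green := (PySem.Int.ofStrBase? (PySem.Str.slice hexColor (some 3) (some 5)) 16).getD 0
          let blue := (PySem.Int.ofStrBase? (PySem.Str.slice hexColor (some 5) (some 7)) 16).getD 0
          (red, green, blue)

-- ===== PORT B =====
-- B's precomputed RGB table
def pvTable : List (Int × Int × Int) :=
  [(244, 109, 67), (253, 174, 97), (254, 224, 139), (230, 245, 152),
   (171, 221, 164), (102, 194, 165), (50, 136, 189)]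

-- B: 'if not any(lst)'; else sorted(range(len(lst)), key=lst.__getitem__, reverse=True)[0]
-- lst.__getitem__ is ported as pyGetD (exact here: every index produced by range(len(lst))
-- is in range, so Python's __getitem__ never raises on them).
def find_max_index_and_color_alt (lst : List Int) : Int × Int × Int :=
  if !(lst.any (fun x => !(x == 0))) then
    (0, 0, 0)  -- Python B returns 'light gray' here: outside Pre_
  else
    let order := PySem.List.sorted (PySem.List.pyRange 0 (PySem.List.len lst) 1)
                   (fun i => PySem.List.pyGetD lst i 0) true
    match PySem.List.pyGet? order 0 with
    | none => (0, 0, 0)                       -- unreachable: lst ≠ [] in this branch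
    | some k =>
      match PySem.List.pyGet? pvTable k with
      | none => (0, 0, 0)                     -- IndexError: outside Pre_
      | some c => c

-- ===== PRECONDITION & SPEC =====
-- Pre_ excludes (i) lists whose elements are all zero (including []), where A returns
-- the string 'light gray', not a value of the declared type Int × Int × Int, and
-- (ii) lists whose first maximum occurs at index ≥ 7, where A raises IndexError.
def Pre_find_max_index_and_color (lst : List Int) : Prop :=
  (∃ x ∈ lst, x ≠ 0) ∧ ∃ x ∈ lst.take 7, ∀ y ∈ lst, y ≤ x
instance (lst : List Int) : Decidable (Pre_find_max_index_and_color lst) := by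
  unfold Pre_find_max_index_and_color; infer_instance

def pvWitness_find_max_index_and_color : List Int := [1, 2, 3]

def Spec_find_max_index_and_color (lst : List Int) (out : Int × Int × Int) : Prop := out = find_max_index_and_color_alt lst
instance (lst : List Int) (out : Int × Int × Int) : Decidable (Spec_find_max_index_and_color lst out) := by unfold Spec_find_max_index_and_color; infer_instance

-- ===== CLAIM (what is proved, stated in full; the proofs are below) =====
def Claim_equal_find_max_index_and_color : Prop := ∀ (lst : List Int), Dom_find_max_index_and_color lst → Pre_find_max_index_and_color lst → Spec_find_max_index_and_color lst (find_max_index_and_color lst)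

-- ===== LEMMAS AND PROOFS =====

-- insertBy with the reverse-sort comparison, one step
theorem pv_insertBy_cons (key : Int → Int) (x h : Int) (t : List Int) :
    PySem.List.insertBy (fun a b => decide (key b < key a)) x (h :: t)
      = if key h < key x then x :: h :: t
        else h :: PySem.List.insertBy (fun a b => decide (key b < key a)) x t := by
  by_cases hc : key h < key x <;> simp [PySem.List.insertBy, hc]

-- head of the insertion-sort fold = the strict-record scan over the remaining elements
theorem pv_foldl_insertBy_head (key : Int → Int) :
    ∀ (xs : List Int) (h : Int) (t : List Int),
    ∃ t', xs.foldl (fun acc x => PySem.List.insertBy (fun a b => decide (key b < key a)) x acc) (h :: t)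
        = (xs.foldl (fun m x => if key m < key x then x else m) h) :: t' := by
  intro xs
  induction xs with
  | nil => intro h t; exact ⟨t, rfl⟩
  | cons x xs ih =>
    intro h t
    by_cases hc : key h < key x
    · simpa [pv_insertBy_cons, hc] using ih x (h :: t)
    · simpa [pv_insertBy_cons, hc] using
        ih h (PySem.List.insertBy (fun a b => decide (key b < key a)) x t)

-- the strict-record scan: either no element beats m, or the result is the first element
-- that attains the overall strict record
theorem pv_scan_spec (key : Int → Int) :
    ∀ (ks : List Int) (m : Int),
    (ks.foldl (fun m x => if key m < key x then x else m) m = m ∧ ∀ x ∈ ks, key x ≤ key m) ∨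
    (∃ p s, ks = p ++ (ks.foldl (fun m x => if key m < key x then x else m) m) :: s ∧
      key m < key (ks.foldl (fun m x => if key m < key x then x else m) m) ∧
      (∀ x ∈ ks, key x ≤ key (ks.foldl (fun m x => if key m < key x then x else m) m)) ∧
      (∀ x ∈ p, key x < key (ks.foldl (fun m x => if key m < key x then x else m) m))) := by
  intro ks
  induction ks with
  | nil => intro m; exact Or.inl ⟨rfl, by simp⟩
  | cons x ks ih =>
    intro m
    by_cases hc : key m < key x
    · simp only [List.foldl_cons, if_pos hc]
      rcases ih x with ⟨hr, hall⟩ | ⟨p, s, hsplit, hlt, hall, hpre⟩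
      · refine Or.inr ⟨[], ks, by simp [hr], by rwa [hr], ?_, by simp⟩
        intro y hy
        rw [hr]
        rcases List.mem_cons.mp hy with rfl | hy
        · exact le_refl _
        · exact hall y hy
      · refine Or.inr ⟨x :: p, s, by rw [List.cons_append, ← hsplit], lt_trans hc hlt, ?_, ?_⟩
        · intro y hy
          rcases List.mem_cons.mp hy with rfl | hy
          · exact le_of_lt hlt
          · exact hall y hy
        · intro y hy
          rcases List.mem_cons.mp hy with rfl | hy
          · exact hlt
          · exact hpre y hy
    · simp only [List.foldl_cons, if_neg hc]
      rcases ih m with ⟨hr, hall⟩ | ⟨p, s, hsplit, hlt, hall, hpre⟩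
      · refine Or.inl ⟨hr, ?_⟩
        intro y hy
        rcases List.mem_cons.mp hy with rfl | hy
        · exact le_of_not_gt hc
        · exact hall y hy
      · refine Or.inr ⟨x :: p, s, by rw [List.cons_append, ← hsplit], hlt, ?_, ?_⟩
        · intro y hy
          rcases List.mem_cons.mp hy with rfl | hy
          · exact le_trans (le_of_not_gt hc) (le_of_lt hlt)
          · exact hall y hy
        · intro y hy
          rcases List.mem_cons.mp hy with rfl | hy
          · exact lt_of_le_of_lt (le_of_not_gt hc) hlt
          · exact hpre y hy

-- A's color parsing agrees with B's table on every index 0..6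
theorem pvColor_table (k : Nat) (hk : k < 7) :
    (match PySem.List.pyGet? pvColors (k : Int) with
      | none => ((0 : Int), (0 : Int), (0 : Int))
      | some hexColor =>
        ((PySem.Int.ofStrBase? (PySem.Str.slice hexColor (some 1) (some 3)) 16).getD 0,
         (PySem.Int.ofStrBase? (PySem.Str.slice hexColor (some 3) (some 5)) 16).getD 0,
         (PySem.Int.ofStrBase? (PySem.Str.slice hexColor (some 5) (some 7)) 16).getD 0))
    = (PySem.List.pyGet? pvTable (k : Int)).getD (0, 0, 0) := by
  interval_cases k <;> decide

-- B's sort key, named for the proofs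
def pvKey (lst : List Int) (i : Int) : Int := PySem.List.pyGetD lst i 0

-- every element of the tail is the key of some index in range(1, len lst)
theorem pv_mem_tail_key (a : Int) (t : List Int) :
    ∀ y ∈ t, ∃ j : Int, j ∈ PySem.List.pyRange 1 (PySem.List.len (a :: t)) 1 ∧ pvKey (a :: t) j = y := by
  intro y hy
  obtain ⟨j, hj, rfl⟩ := List.getElem_of_mem hy
  refine ⟨((j + 1 : Nat) : Int), ?_, ?_⟩
  · rw [PySem.List.mem_pyRange_one]
    simp [PySem.List.len_eq]
    omega
  · have hj' : j + 1 < (a :: t).length := by simpa using Nat.succ_lt_succ hj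
    simp only [pvKey, PySem.List.pyGetD_natCast]
    simp [List.getD_eq_getElem?_getD, List.getElem?_eq_getElem hj']

-- the head of B's descending stable sort is the first index of the maximum of lst
theorem pv_head_eq_first_argmax (a : Int) (t : List Int) :
    ∃ K : Nat, PySem.List.index? (a :: t) (t.foldl max a) = some K ∧
      ∃ t', PySem.List.sorted (PySem.List.pyRange 0 (PySem.List.len (a :: t)) 1) (fun i => PySem.List.pyGetD (a :: t) i 0) true
            = ((K : Int)) :: t' := by
  have hn : PySem.List.len (a :: t) = ((t.length : Int) + 1) := by
    simp [PySem.List.len_eq]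
  have h0n : (0 : Int) < PySem.List.len (a :: t) := by rw [hn]; positivity
  have hsr := PySem.List.sorted_rev_eq_foldl_insertBy
    (PySem.List.pyRange 0 (PySem.List.len (a :: t)) 1) (fun i => PySem.List.pyGetD (a :: t) i 0)
  rw [PySem.List.pyRange_one_cons h0n, List.foldl_cons] at hsr
  have hbase : PySem.List.insertBy
      (fun x y => decide (PySem.List.pyGetD (a :: t) y 0 < PySem.List.pyGetD (a :: t) x 0)) 0 [] = [0] := rfl
  rw [hbase] at hsr
  obtain ⟨t', ht'⟩ := pv_foldl_insertBy_head (fun i => PySem.List.pyGetD (a :: t) i 0)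
    (PySem.List.pyRange (0 + 1) (PySem.List.len (a :: t)) 1) 0 []
  set R := (PySem.List.pyRange (0 + 1) (PySem.List.len (a :: t)) 1).foldl
    (fun m x => if PySem.List.pyGetD (a :: t) m 0 < PySem.List.pyGetD (a :: t) x 0 then x else m) 0 with hRdef
  have hkey0 : PySem.List.pyGetD (a :: t) (0 : Int) 0 = a := by
    simp [PySem.List.pyGetD_zero_cons]
  rcases pv_scan_spec (fun i => PySem.List.pyGetD (a :: t) i 0)
      (PySem.List.pyRange (0 + 1) (PySem.List.len (a :: t)) 1) 0 with
    ⟨hr, hall⟩ | ⟨p, s, hsplit, hlt, hall, hpre⟩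
  · -- no index beats index 0: the max is a, its first index is 0
    rw [← hRdef] at hr
    have hMa : t.foldl max a = a := by
      rcases PySem.List.foldl_max_mem t a with h | h
      · exact h
      · obtain ⟨j, hjmem, hjkey⟩ := pv_mem_tail_key a t _ h
        have := hall j (by simpa using hjmem)
        simp only [hkey0] at this
        exact le_antisymm (by simpa [pvKey] using hjkey ▸ this) (PySem.List.le_foldl_max t a).1
    refine ⟨0, by rw [hMa]; exact PySem.List.index?_cons_self a t, t', ?_⟩
    rw [PySem.List.pyRange_one_cons h0n, hsr, ht', hr]
    norm_num
  · -- index R beats index 0 and every other index: R is the first index of the max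
    rw [← hRdef] at hsplit hlt hall hpre
    have hrange : PySem.List.pyRange (0 + 1) (PySem.List.len (a :: t)) 1
        = (List.range t.length).map (fun k : Nat => (1 : Int) + (k : Int)) := by
      rw [show ((0 : Int) + 1) = 1 by norm_num, PySem.List.pyRange_one, hn]
      have : (((t.length : Int) + 1) - 1).toNat = t.length := by omega
      rw [this]
    rw [hrange] at hsplit
    set L := p.length with hLdef
    have hlen : t.length = L + (1 + s.length) := by
      have h := congrArg List.length hsplit
      simp at h
      omega
    have hLd : L < t.length := by omega
    have hRval : R = 1 + (L : Int) := by
      have h1 := congrArg (fun l => l[L]?) hsplit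
      simp only [List.getElem?_map, List.getElem?_range hLd,
        List.getElem?_append_right (le_refl L)] at h1
      rw [hLdef, Nat.sub_self] at h1
      simp only [List.getElem?_cons_zero, Option.map_some, Option.some.injEq] at h1
      rw [hLdef]
      exact h1.symm
    have hKlen : L + 1 < (a :: t).length := by simp; omega
    have hcast : R = ((L + 1 : Nat) : Int) := by rw [hRval]; push_cast; ring
    have hkeyR : PySem.List.pyGetD (a :: t) R 0 = (a :: t)[L + 1] := by
      rw [hcast, PySem.List.pyGetD_natCast, List.getD_eq_getElem?_getD,
        List.getElem?_eq_getElem hKlen]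
      rfl
    have hmemT : (a :: t)[L + 1] ∈ t := by
      rw [List.getElem_cons_succ]
      exact List.getElem_mem _
    have hMK : t.foldl max a = (a :: t)[L + 1] := by
      refine le_antisymm ?_ ?_
      · rcases PySem.List.foldl_max_mem t a with h | h
        · rw [h, ← hkeyR]
          calc a = PySem.List.pyGetD (a :: t) 0 0 := hkey0.symm
            _ ≤ _ := le_of_lt hlt
        · obtain ⟨j, hjmem, hjkey⟩ := pv_mem_tail_key a t _ h
          have := hall j (by simpa [hrange] using hjmem)
          rw [← hkeyR]
          simpa [pvKey] using hjkey ▸ this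
      · rw [List.getElem_cons_succ]
        exact (PySem.List.le_foldl_max t a).2 _ (List.getElem_mem _)
    have hp : p = (List.range L).map (fun k : Nat => (1 : Int) + (k : Int)) := by
      have h2 := congrArg (fun l => List.take L l) hsplit
      simp only at h2
      rw [← List.map_take, List.take_range, min_eq_left hLd.le] at h2
      rw [show L = p.length from rfl, List.take_left] at h2
      exact h2.symm
    have hnotin : t.foldl max a ∉ (a :: t).take (L + 1) := by
      intro hmem
      obtain ⟨j, hj, hje⟩ := List.mem_take_iff_getElem.mp hmem
      have hjK : j < L + 1 := lt_of_lt_of_le hj (min_le_left _ _)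
      cases j with
      | zero =>
        have : a < t.foldl max a := by
          rw [hMK, ← hkeyR]
          calc a = PySem.List.pyGetD (a :: t) 0 0 := hkey0.symm
            _ < _ := hlt
        simp only [List.getElem_cons_zero] at hje
        omega
      | succ jj =>
        have hjjL : jj < L := by omega
        have hmemp : ((1 : Int) + jj) ∈ p := by
          rw [hp]
          exact List.mem_map.mpr ⟨jj, List.mem_range.mpr hjjL, rfl⟩
        have hkj : PySem.List.pyGetD (a :: t) ((1 : Int) + jj) 0 = (a :: t)[jj + 1] := by
          rw [show ((1 : Int) + jj) = ((jj + 1 : Nat) : Int) by push_cast; ring,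
            PySem.List.pyGetD_natCast, List.getD_eq_getElem?_getD,
            List.getElem?_eq_getElem (by simp; omega : jj + 1 < (a :: t).length)]
          rfl
        have := hpre _ hmemp
        rw [hkj, hkeyR] at this
        rw [hje, hMK] at this
        exact lt_irrefl _ this
    have hidx : PySem.List.index? (a :: t) (t.foldl max a) = some (L + 1) := by
      apply (PySem.List.index?_eq_some_iff _ _ _).mpr
      refine ⟨(a :: t).take (L + 1), (a :: t).drop (L + 2), ?_, ?_, hnotin⟩
      · rw [hMK]
        conv_lhs => rw [← List.take_append_drop (L + 1) (a :: t)]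
        congr 1
        rw [List.drop_eq_getElem_cons hKlen]
      · rw [List.length_take]
        omega
    refine ⟨L + 1, hidx, t', ?_⟩
    rw [PySem.List.pyRange_one_cons h0n, hsr, ht', hcast]

-- ===== VERDICT =====
theorem find_max_index_and_color_spec : Claim_equal_find_max_index_and_color := by
  intro lst _ hpre
  obtain ⟨⟨x0, hx0mem, hx0ne⟩, x1, hx1mem, hx1max⟩ := hpre
  unfold Spec_find_max_index_and_color
  have hnzA : lst.all (fun x => decide (x = 0)) = false := by
    simp only [Bool.eq_false_iff, ne_eq, List.all_eq_true, decide_eq_true_eq]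
    intro h; exact hx0ne (h x0 hx0mem)
  have hnzB : (!(lst.any fun x => !(x == 0))) = false := by
    simp only [Bool.not_eq_false', List.any_eq_true, Bool.not_eq_true']
    exact ⟨x0, hx0mem, by simpa using hx0ne⟩
  obtain ⟨a, t, rfl⟩ : ∃ a t, lst = a :: t := by
    cases lst with
    | nil => cases hx0mem
    | cons a b => exact ⟨a, b, rfl⟩
  set M := t.foldl max a with hMdef
  have hmax : PySem.List.max? (a :: t) (fun y => y) = some M := PySem.List.max?_id_cons a t
  have hMmem : M ∈ a :: t := PySem.List.max?_mem hmax
  have hMub : ∀ y ∈ a :: t, y ≤ M := fun y hy => PySem.List.max?_isMax hmax y hy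
  obtain ⟨K, hidx, t', hhead⟩ := pv_head_eq_first_argmax a t
  -- K < 7 from Pre_: the first index of the max lies among the first 7 elements
  have hx1M : x1 = M := le_antisymm (hMub x1 (List.mem_of_mem_take hx1mem)) (hx1max M hMmem)
  rw [hx1M] at hx1mem
  have hK7 : K < 7 := by
    obtain ⟨pre, suf, hsplit, hlen, hnotin⟩ := (PySem.List.index?_eq_some_iff _ _ _).mp hidx
    by_contra hge
    have h7 : 7 ≤ pre.length := by omega
    rw [hsplit, List.take_append_of_le_length h7] at hx1mem
    exact hnotin (List.mem_of_mem_take hx1mem)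
  -- assemble both sides
  unfold find_max_index_and_color find_max_index_and_color_alt
  simp only [hnzA, hnzB, Bool.false_eq_true, if_false, hmax, hhead,
    PySem.List.pyGet?_zero_cons]
  rw [hidx]
  have hct := pvColor_table K hK7
  simp only [PySem.List.pyGet?_natCast] at hct ⊢
  rw [hct]
  cases pvTable[K]? <;> rfl
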